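-- pv_equiv track=rewrite | github.com/maverikod/ai-admin-server | scripts/migrate_commands_to_unified.py | _update_imports
-- ===== SOURCE A (Python) =====
-- from typing import Dict, List, Set
--
-- def _update_imports(lines: List[str]) -> List[str]:
--     """Update imports for unified template.
--
--     Args:
--         lines: File lines
--
--     Returns:
--         Updated import lines
--     """
--     import_lines = []
--     in_imports = True
--
--     for line in lines:
--         if in_imports and (line.startswith('import ') or line.startswith('from ')):
--             # Update Command import
--             if 'from mcp_proxy_adapter.commands.base import Command' in line:
--                 import_lines.append('from ai_admin.commands.base_unified_command import BaseUnifiedCommand')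
--             else:
--                 import_lines.append(line)
--         elif in_imports and line.strip() == '':
--             import_lines.append(line)
--         elif in_imports and not line.startswith('#'):
--             in_imports = False
--             import_lines.append(line)
--         else:
--             import_lines.append(line)
--
--     return import_lines
-- ===== SOURCE B (Python) =====
-- from typing import Dict, List, Set
--
-- _OLD = 'from mcp_proxy_adapter.commands.base import Command'
-- _NEW = 'from ai_admin.commands.base_unified_command import BaseUnifiedCommand'
--
--
-- def _is_import_block_line(line: str) -> bool:
--     return (line.startswith('import ') or line.startswith('from ')
--             or line.strip() == '' or line.startswith('#'))
--
--
-- def _update_imports(lines: List[str]) -> List[str]: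
--     """Locate the end of the import block, then rewrite only that prefix."""
--     boundary = next((i for i, ln in enumerate(lines)
--                      if not _is_import_block_line(ln)), len(lines))
--     head = [_NEW if (ln.startswith(('import ', 'from ')) and _OLD in ln) else ln
--             for ln in lines[:boundary]]
--     return head + lines[boundary:]
-- ===== Notes on version B (the rewrite author's own statement) =====
-- stated objective: simpler
-- what changed: Replaced A's single stateful in_imports-flag loop with a locate-the-boundary (takeWhile/first non-import-block line) step followed by a map over the prefix and a verbatim copy of the suffix.
import Mathlib
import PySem

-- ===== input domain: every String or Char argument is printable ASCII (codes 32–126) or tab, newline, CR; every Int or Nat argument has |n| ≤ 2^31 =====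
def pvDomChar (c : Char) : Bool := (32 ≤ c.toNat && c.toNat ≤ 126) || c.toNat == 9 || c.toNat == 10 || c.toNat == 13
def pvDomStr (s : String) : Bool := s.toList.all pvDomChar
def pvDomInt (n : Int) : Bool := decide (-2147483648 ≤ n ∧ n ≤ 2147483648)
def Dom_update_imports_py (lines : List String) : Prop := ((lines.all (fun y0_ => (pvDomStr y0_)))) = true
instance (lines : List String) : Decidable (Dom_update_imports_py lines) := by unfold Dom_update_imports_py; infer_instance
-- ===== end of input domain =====

-- B replaces A's stateful in_imports flag loop with a locate-boundary (takeWhile/dropWhile)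
-- then map-prefix structure; objective: simpler decomposition, same cost.


def pvOldImport : String := "from mcp_proxy_adapter.commands.base import Command"
def pvNewImport : String := "from ai_admin.commands.base_unified_command import BaseUnifiedCommand"

-- ===== PORT A =====
-- one loop step of A: state = (import_lines, in_imports)
def pvAStep (st : List String × Bool) (line : String) : List String × Bool :=
  if st.2 && (PySem.Str.startswith line "import " || PySem.Str.startswith line "from ") then
    (if PySem.Str.isIn pvOldImport line then
      (st.1 ++ [pvNewImport], st.2)
    else
      (st.1 ++ [line], st.2))
  else if st.2 && (PySem.Str.strip line == "") then
    (st.1 ++ [line], st.2)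
  else if st.2 && !(PySem.Str.startswith line "#") then
    (st.1 ++ [line], false)
  else
    (st.1 ++ [line], st.2)

def update_imports_py (lines : List String) : List String :=
  (lines.foldl pvAStep ([], true)).1

-- ===== PORT B =====
def pvIsImportBlockLine (line : String) : Bool :=
  (PySem.Str.startswith line "import " || PySem.Str.startswith line "from ") ||
    PySem.Str.strip line == "" || PySem.Str.startswith line "#"

def pvRewrite (line : String) : String :=
  if (PySem.Str.startswith line "import " || PySem.Str.startswith line "from ") &&
      PySem.Str.isIn pvOldImport line then pvNewImport else line

def update_imports_py_alt (lines : List String) : List String :=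
  (lines.takeWhile pvIsImportBlockLine).map pvRewrite ++ lines.dropWhile pvIsImportBlockLine

-- ===== PRECONDITION & SPEC =====
def Spec_update_imports_py (lines : List String) (out : List String) : Prop := out = update_imports_py_alt lines
instance (lines : List String) (out : List String) : Decidable (Spec_update_imports_py lines out) := by unfold Spec_update_imports_py; infer_instance

-- ===== CLAIM (what is proved, stated in full; the proofs are below) =====
def Claim_equal_update_imports_py : Prop := ∀ (lines : List String), Dom_update_imports_py lines → Spec_update_imports_py lines (update_imports_py lines)

-- ===== LEMMAS AND PROOFS =====

-- once in_imports is False, A appends every remaining line unchanged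
lemma pvLoop_false (lines : List String) : ∀ acc : List String,
    (lines.foldl pvAStep (acc, false)).1 = acc ++ lines := by
  induction lines with
  | nil => intro acc; simp
  | cons x xs ih =>
      intro acc
      rw [List.foldl_cons]
      simp only [pvAStep, Bool.false_and, Bool.false_eq_true, if_false]
      rw [ih]
      simp

-- while in_imports is True, A's loop is B's map-prefix / copy-suffix
lemma pvLoop_true (lines : List String) : ∀ acc : List String,
    (lines.foldl pvAStep (acc, true)).1 =
      acc ++ (lines.takeWhile pvIsImportBlockLine).map pvRewrite ++ lines.dropWhile pvIsImportBlockLine := by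
  induction lines with
  | nil => intro acc; simp
  | cons x xs ih =>
      intro acc
      rw [List.foldl_cons]
      cases h1 : (PySem.Str.startswith x "import " || PySem.Str.startswith x "from ") with
      | true =>
        have hk : pvIsImportBlockLine x = true := by
          simp only [pvIsImportBlockLine, h1, Bool.true_or]
        cases h2 : PySem.Str.isIn pvOldImport x with
        | true =>
          have hr : pvRewrite x = pvNewImport := by
            simp only [pvRewrite, h1, h2, Bool.true_and, if_true]
          simp only [pvAStep, Bool.true_and, h1, if_true, h2]
          rw [ih]
          simp [hk, hr]
        | false =>
          have hr : pvRewrite x = x := by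
            simp only [pvRewrite, h1, h2, Bool.true_and, Bool.false_eq_true, if_false]
          simp only [pvAStep, Bool.true_and, h1, if_true, h2, Bool.false_eq_true, if_false]
          rw [ih]
          simp [hk, hr]
      | false =>
        have hr : pvRewrite x = x := by
          simp only [pvRewrite, h1, Bool.false_and, Bool.false_eq_true, if_false]
        cases h2 : (PySem.Str.strip x == "") with
        | true =>
          have hk : pvIsImportBlockLine x = true := by
            simp only [pvIsImportBlockLine, h2, Bool.true_or, Bool.or_true]
          simp only [pvAStep, Bool.true_and, h1, Bool.false_eq_true, if_false, h2, if_true]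
          rw [ih]
          simp [hk, hr]
        | false =>
          cases h3 : PySem.Str.startswith x "#" with
          | true =>
            have hk : pvIsImportBlockLine x = true := by
              simp only [pvIsImportBlockLine, h3, Bool.or_true]
            simp only [pvAStep, Bool.true_and, h1, Bool.false_eq_true, if_false, h2, h3,
              Bool.not_true, if_false]
            rw [ih]
            simp [hk, hr]
          | false =>
            have hk : pvIsImportBlockLine x = false := by
              simp only [pvIsImportBlockLine, h1, h2, h3, Bool.or_false]
            simp only [pvAStep, Bool.true_and, h1, Bool.false_eq_true, if_false, h2, h3,
              Bool.not_false, if_true]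
            rw [pvLoop_false]
            simp [hk]

-- ===== VERDICT (by name: the statement is the Claim_ definition above) =====
theorem update_imports_py_spec : Claim_equal_update_imports_py := by
  intro lines _
  unfold Spec_update_imports_py update_imports_py update_imports_py_alt
  rw [pvLoop_true]
  simp
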